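-- pv_equiv track=rewrite | github.com/CiDong0418/Robot_Arm_and_my_system_for_sim | src/dabc_optimizer/src/dabc_optimizer/fitness.py | _choose_hand_to_store
-- ===== SOURCE A (Python) =====
-- def _choose_hand_to_store(hand_holding, resource_clock):
--     candidates = []
--     for hand, obj in hand_holding.items():
--         if obj is not None:
--             candidates.append((resource_clock.get(hand, 0), hand))
--     if not candidates:
--         return None
--     candidates.sort(key=lambda item: (item[0], item[1]))
--     return candidates[-1][1]
-- ===== SOURCE B (Python) =====
-- def _choose_hand_to_store(hand_holding, resource_clock):
--     best = None
--     best_key = None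
--     for hand, obj in hand_holding.items():
--         if obj is None:
--             continue
--         key = (resource_clock.get(hand, 0), hand)
--         if best_key is None or key > best_key:
--             best_key = key
--             best = hand
--     return best
-- ===== Notes on version B (the rewrite author's own statement) =====
-- stated objective: simpler
-- what changed: Replaced A's collect-all-candidates, sort by (clock, hand), take-last pattern with a single-pass running maximum that keeps the best (clock, hand) key seen so far; no intermediate list or sort.
import Mathlib
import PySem

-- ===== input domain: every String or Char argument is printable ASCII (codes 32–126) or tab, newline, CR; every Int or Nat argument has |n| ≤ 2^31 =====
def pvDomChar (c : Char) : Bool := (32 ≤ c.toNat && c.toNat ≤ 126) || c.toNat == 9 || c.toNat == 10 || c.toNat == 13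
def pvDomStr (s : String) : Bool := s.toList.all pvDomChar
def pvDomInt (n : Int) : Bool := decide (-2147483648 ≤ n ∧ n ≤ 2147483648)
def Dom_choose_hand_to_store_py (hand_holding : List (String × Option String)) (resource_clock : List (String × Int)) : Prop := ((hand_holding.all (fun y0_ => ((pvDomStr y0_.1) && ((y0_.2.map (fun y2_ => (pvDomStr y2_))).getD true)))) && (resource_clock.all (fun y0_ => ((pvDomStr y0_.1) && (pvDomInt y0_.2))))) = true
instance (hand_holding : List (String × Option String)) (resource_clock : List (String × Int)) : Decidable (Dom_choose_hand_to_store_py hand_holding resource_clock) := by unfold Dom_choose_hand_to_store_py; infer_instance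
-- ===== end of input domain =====

-- B replaces A's collect-sort-take-last with a single-pass running maximum over the (clock, hand) key (simpler: one selection scan, no intermediate sorted list).

-- ===== PORT A =====
-- collect (clock, hand) candidates, sort by the tuple key, return the hand of the last one
def choose_hand_to_store_py (hand_holding : List (String × Option String)) (resource_clock : List (String × Int)) : Option String :=
  let candidates := hand_holding.foldl
    (fun acc y => if y.2.isSome then acc ++ [(PySem.Dict.getD (PySem.Dict.mk resource_clock) y.1 0, y.1)] else acc) []
  if candidates = [] then none
  else (PySem.List.pyGet? (PySem.List.sorted2 candidates Prod.fst Prod.snd false) (-1)).map Prod.snd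

-- ===== PORT B =====
-- single pass: running maximum of the tuple key (clock, hand); 'key > best_key' is Python's lexicographic tuple comparison
def choose_hand_to_store_py_alt (hand_holding : List (String × Option String)) (resource_clock : List (String × Int)) : Option String :=
  (hand_holding.foldl
    (fun st y =>
      match y.2 with
      | none => st
      | some _ =>
        let key : Int × String := (PySem.Dict.getD (PySem.Dict.mk resource_clock) y.1 0, y.1)
        match st.2 with
        | none => (some y.1, some key)
        | some bk =>
          if decide (bk.1 < key.1) || (decide (bk.1 = key.1) && decide (bk.2 < key.2))
          then (some y.1, some key) else st)
    ((none, none) : Option String × Option (Int × String))).1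

-- ===== PRECONDITION & SPEC =====
def Spec_choose_hand_to_store_py (hand_holding : List (String × Option String)) (resource_clock : List (String × Int)) (out : Option String) : Prop := out = choose_hand_to_store_py_alt hand_holding resource_clock
instance (hand_holding : List (String × Option String)) (resource_clock : List (String × Int)) (out : Option String) : Decidable (Spec_choose_hand_to_store_py hand_holding resource_clock out) := by unfold Spec_choose_hand_to_store_py; infer_instance

-- ===== CLAIM (what is proved, stated in full; the proofs are below) =====
def Claim_equal_choose_hand_to_store_py : Prop := ∀ (hand_holding : List (String × Option String)) (resource_clock : List (String × Int)), Dom_choose_hand_to_store_py hand_holding resource_clock → Spec_choose_hand_to_store_py hand_holding resource_clock (choose_hand_to_store_py hand_holding resource_clock)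

-- ===== LEMMAS AND PROOFS =====

-- the lexicographic (clock, hand) key
def pvKey (p : Int × String) : Lex (Int × String) := toLex p

-- B's step on a single candidate
def pvStep (st : Option String × Option (Int × String)) (c : Int × String) : Option String × Option (Int × String) :=
  match st.2 with
  | none => (some c.2, some c)
  | some bk =>
    if decide (bk.1 < c.1) || (decide (bk.1 = c.1) && decide (bk.2 < c.2))
    then (some c.2, some c) else st

lemma pvStep_cond (bk c : Int × String) :
    (decide (bk.1 < c.1) || (decide (bk.1 = c.1) && decide (bk.2 < c.2))) = true ↔ pvKey bk < pvKey c := by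
  simp [pvKey, Prod.Lex.lt_iff]

lemma pvStep_some (b c : Int × String) :
    pvStep (some b.2, some b) c =
      if pvKey b < pvKey c then (some c.2, some c) else (some b.2, some b) := by
  simp only [pvStep]
  by_cases h : pvKey b < pvKey c
  · rw [if_pos ((pvStep_cond b c).mpr h), if_pos h]
  · rw [if_neg (fun hb => h ((pvStep_cond b c).mp hb)), if_neg h]

lemma pvKey_inj {a b : Int × String} (h : pvKey a = pvKey b) : a = b := by
  simpa [pvKey] using h

-- the running-max fold computes a maximum of b :: xs (and carries its hand)
lemma pvFold_max (xs : List (Int × String)) (b : Int × String) :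
    ∃ m, xs.foldl pvStep (some b.2, some b) = (some m.2, some m) ∧
      m ∈ b :: xs ∧ ∀ y ∈ b :: xs, pvKey y ≤ pvKey m := by
  induction xs generalizing b with
  | nil => exact ⟨b, rfl, by simp, by simp⟩
  | cons c t ih =>
    rw [List.foldl_cons, pvStep_some]
    by_cases h : pvKey b < pvKey c
    · rw [if_pos h]
      obtain ⟨m, hm, hmem, hmax⟩ := ih c
      refine ⟨m, hm, ?_, ?_⟩
      · rcases List.mem_cons.mp hmem with h1 | h1 <;> simp [List.mem_cons, h1]
      · intro y hy
        rcases List.mem_cons.mp hy with h1 | hy'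
        · exact le_trans (le_of_lt (h1 ▸ h)) (hmax c (List.mem_cons_self))
        · exact hmax y hy'
    · rw [if_neg h]
      obtain ⟨m, hm, hmem, hmax⟩ := ih b
      refine ⟨m, hm, ?_, ?_⟩
      · rcases List.mem_cons.mp hmem with h1 | h1 <;> simp [List.mem_cons, h1]
      · intro y hy
        have hcb : pvKey c ≤ pvKey b := le_of_not_gt h
        rcases List.mem_cons.mp hy with h1 | hy'
        · exact hmax y (h1 ▸ List.mem_cons_self)
        · rcases List.mem_cons.mp hy' with h1 | h1
          · exact le_trans (h1 ▸ hcb) (hmax b List.mem_cons_self)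
          · exact hmax y (List.mem_cons_of_mem b h1)

-- the last element of a ≤-pairwise list is a maximum
lemma pvPairwise_getLast (s : List (Int × String)) (hp : s.Pairwise (fun a b => pvKey a ≤ pvKey b))
    (hne : s ≠ []) : ∀ y ∈ s, pvKey y ≤ pvKey (s.getLast hne) := by
  induction s with
  | nil => simp at hne
  | cons a t ih =>
    intro y hy
    cases t with
    | nil =>
      simp at hy
      simp [hy, List.getLast]
    | cons b u =>
      rw [List.getLast_cons (by simp)]
      rcases List.mem_cons.mp hy with h1 | h1
      · exact h1 ▸ (List.pairwise_cons.mp hp).1 _ (List.getLast_mem _)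
      · exact ih (List.pairwise_cons.mp hp).2 (by simp) y h1

-- sorted2 with fst/snd keys is sorted with the lexicographic key
lemma pvSorted2_eq (xs : List (Int × String)) :
    PySem.List.sorted2 xs Prod.fst Prod.snd false = PySem.List.sorted xs pvKey false := by
  show List.foldl (fun acc x => PySem.List.insertBy
      (fun a b : Int × String => decide (a.1 < b.1) || (!decide (b.1 < a.1) && decide (a.2 < b.2))) x acc) [] xs
    = List.foldl (fun acc x => PySem.List.insertBy
      (fun a b : Int × String => decide (pvKey a < pvKey b)) x acc) [] xs
  congr 1
  funext acc x
  congr 1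
  funext a b
  rcases lt_trichotomy a.1 b.1 with h | h | h
  · simp [pvKey, Prod.Lex.lt_iff, h, lt_asymm h]
  · simp [pvKey, Prod.Lex.lt_iff, h]
  · simp [pvKey, Prod.Lex.lt_iff, h, lt_asymm h]
    intro he
    exact absurd h (by omega)

-- xs[-1] of a nonempty list is its last element
lemma pvPyGet_neg_one {α : Type} (xs : List α) (hne : xs ≠ []) :
    PySem.List.pyGet? xs (-1) = some (xs.getLast hne) := by
  have hlen : 0 < xs.length := List.length_pos_iff.mpr hne
  simp only [PySem.List.pyGet?, PySem.List.pyIdx?]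
  rw [if_neg (by omega : ¬ (0:Int) ≤ -1), if_pos (by omega : -(xs.length:Int) ≤ -1)]
  have h1 : xs.length - (-(-1:Int)).toNat = xs.length - 1 := by norm_num
  rw [h1]
  simp [List.getLast_eq_getElem, List.getElem?_eq_getElem (show xs.length - 1 < xs.length by omega)]

-- core: last of the sorted candidate list = running maximum of the candidate list
lemma pvCore (xs : List (Int × String)) :
    (if xs = [] then none
     else (PySem.List.pyGet? (PySem.List.sorted2 xs Prod.fst Prod.snd false) (-1)).map Prod.snd)
    = (xs.foldl pvStep ((none, none) : Option String × Option (Int × String))).1 := by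
  cases xs with
  | nil => rfl
  | cons c t =>
    have hstep : pvStep ((none, none) : Option String × Option (Int × String)) c = (some c.2, some c) := rfl
    obtain ⟨m, hm, hmem, hmax⟩ := pvFold_max t c
    have hsne : PySem.List.sorted (c :: t) pvKey false ≠ [] := by
      simp [PySem.List.sorted_eq_nil_iff]
    set s := PySem.List.sorted (c :: t) pvKey false with hs
    have hperm := PySem.List.sorted_perm (c :: t) pvKey false
    have hlmem : s.getLast hsne ∈ (c :: t) := hperm.mem_iff.mp (List.getLast_mem _)
    have hlmax : ∀ y ∈ (c :: t), pvKey y ≤ pvKey (s.getLast hsne) := by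
      intro y hy
      exact pvPairwise_getLast s (PySem.List.sorted_pairwise (c :: t) pvKey) hsne y (hperm.mem_iff.mpr hy)
    have heq : s.getLast hsne = m :=
      pvKey_inj (le_antisymm (hmax _ hlmem) (hlmax m hmem))
    simp only [List.foldl_cons, hstep, hm]
    rw [if_neg (by simp), pvSorted2_eq, ← hs, pvPyGet_neg_one s hsne, heq]
    rfl

-- B's loop body, per entry, is: skip None, otherwise pvStep on the key
lemma pvAltBody (resource_clock : List (String × Int)) :
    (fun (st : Option String × Option (Int × String)) (y : String × Option String) =>
      match y.2 with
      | none => st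
      | some _ =>
        let key : Int × String := (PySem.Dict.getD (PySem.Dict.mk resource_clock) y.1 0, y.1)
        match st.2 with
        | none => (some y.1, some key)
        | some bk =>
          if decide (bk.1 < key.1) || (decide (bk.1 = key.1) && decide (bk.2 < key.2))
          then (some y.1, some key) else st)
    = (fun st y => if y.2.isSome
        then pvStep st (PySem.Dict.getD (PySem.Dict.mk resource_clock) y.1 0, y.1) else st) := by
  funext st y
  rcases y with ⟨h, o⟩
  cases o <;> rcases st with ⟨b, bk⟩ <;> cases bk <;> rfl

-- ===== VERDICT (by name: the statement is the Claim_ definition above) =====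
theorem choose_hand_to_store_py_spec : Claim_equal_choose_hand_to_store_py := by
  intro hh rc _
  unfold Spec_choose_hand_to_store_py choose_hand_to_store_py choose_hand_to_store_py_alt
  rw [pvAltBody rc]
  rw [PySem.List.foldl_append_if (fun y => y.2.isSome)
    (fun y => (PySem.Dict.getD (PySem.Dict.mk rc) y.1 0, y.1)) hh []]
  rw [PySem.List.foldl_if_eq_foldl_filter (fun y => y.2.isSome)
    (fun st y => pvStep st (PySem.Dict.getD (PySem.Dict.mk rc) y.1 0, y.1)) hh ((none, none))]
  rw [← List.foldl_map]
  simpa using pvCore ((hh.filter (fun y => y.2.isSome)).map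
    (fun y => (PySem.Dict.getD (PySem.Dict.mk rc) y.1 0, y.1)))
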